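-- pv_equiv track=rewrite | github.com/2811907609/lixiang_code_clone | codebuddy/inference_server/inference_server/modules/specedit/diff/krew_algo.py | _compare_suffixes
-- ===== SOURCE A (Python) =====
-- def _compare_suffixes(s, i, j):
--     """
--     Compares two suffixes starting at positions i and j.
--     """
--     while i < len(s) and j < len(s):
--         if s[i] < s[j]:
--             return -1
--         elif s[i] > s[j]:
--             return 1
--         i += 1
--         j += 1
--     return 0
-- ===== SOURCE B (Python) =====
-- def _compare_suffixes(s, i, j):
--     k = max(0, min(len(s) - i, len(s) - j))
--     a, b = s[i:i+k], s[j:j+k]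
--     return (a > b) - (a < b)
-- ===== Notes on version B (the rewrite author's own statement) =====
-- stated objective: simpler
-- what changed: B replaces A's per-character while loop with a closed-form computation: take k = max(0, min(len(s)-i, len(s)-j)) characters, slice the two equal-length windows and return the sign of their builtin lexicographic comparison.
-- outside the precondition, e.g. on _compare_suffixes('ab', -1, 0): A returns 1, B returns -1; on _compare_suffixes('abc', -5, 0): A raises IndexError, B returns -1
import Mathlib
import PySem

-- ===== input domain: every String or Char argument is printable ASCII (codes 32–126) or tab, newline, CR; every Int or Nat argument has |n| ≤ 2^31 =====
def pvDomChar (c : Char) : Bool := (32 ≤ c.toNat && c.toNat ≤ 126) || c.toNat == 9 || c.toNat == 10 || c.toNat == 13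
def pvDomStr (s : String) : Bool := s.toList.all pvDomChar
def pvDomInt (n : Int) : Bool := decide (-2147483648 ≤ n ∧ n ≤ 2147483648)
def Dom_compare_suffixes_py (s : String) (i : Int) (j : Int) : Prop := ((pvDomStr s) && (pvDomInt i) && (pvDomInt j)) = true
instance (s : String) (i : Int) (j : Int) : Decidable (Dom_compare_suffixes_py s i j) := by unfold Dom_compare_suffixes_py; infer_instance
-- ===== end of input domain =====

-- B replaces A's per-character while loop by slicing the two k-character windows (k = the number
-- of comparisons A's loop performs) and returning the sign of their builtin lexicographic
-- comparison; objective: simpler.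

-- ===== PORT A =====
-- the while loop of A: i, j advance together while both are < len(s);
-- s[i] / s[j] via pyGet? (none = IndexError, unreachable under Pre_)
def pvGoA (cs : List Char) (i j : Int) : Int :=
  if _h : i < (cs.length : Int) ∧ j < (cs.length : Int) then
    match PySem.List.pyGet? cs i, PySem.List.pyGet? cs j with
    | some a, some b =>
      if a < b then -1
      else if b < a then 1
      else pvGoA cs (i + 1) (j + 1)
    | _, _ => 0   -- IndexError in Python; outside Pre_
  else 0
termination_by ((cs.length : Int) - i).toNat
decreasing_by omega

def compare_suffixes_py (s : String) (i : Int) (j : Int) : Int :=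
  pvGoA s.toList i j

-- ===== PORT B =====
def compare_suffixes_py_alt (s : String) (i : Int) (j : Int) : Int :=
  let cs := s.toList
  let n : Int := cs.length
  let k : Int := max 0 (min (n - i) (n - j))
  let a := PySem.List.slice cs (some i) (some (i + k))
  let b := PySem.List.slice cs (some j) (some (j + k))
  (if b < a then 1 else 0) - (if a < b then 1 else 0)

-- ===== PRECONDITION & SPEC =====
-- Pre_ admits all non-negative indices, the inputs where A's loop never runs (i or j ≥ len(s))
-- and the trivially equal case i = j ≥ -len(s); it excludes the remaining negative-index inputs,
-- where A raises IndexError (below -len(s)) or reads characters through Python's accidental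
-- negative-index wraparound — a corner no caller of a suffix comparator would specify.
def Pre_compare_suffixes_py (s : String) (i : Int) (j : Int) : Prop :=
  (0 ≤ i ∧ 0 ≤ j) ∨ (PySem.Str.len s ≤ i) ∨ (PySem.Str.len s ≤ j) ∨
    (i = j ∧ -(PySem.Str.len s) ≤ i)
instance (s : String) (i : Int) (j : Int) : Decidable (Pre_compare_suffixes_py s i j) := by
  unfold Pre_compare_suffixes_py; infer_instance

def pvWitness_compare_suffixes_py : String × Int × Int := ("ab", 0, 1)

def Spec_compare_suffixes_py (s : String) (i : Int) (j : Int) (out : Int) : Prop :=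
  out = compare_suffixes_py_alt s i j
instance (s : String) (i : Int) (j : Int) (out : Int) :
    Decidable (Spec_compare_suffixes_py s i j out) := by
  unfold Spec_compare_suffixes_py; infer_instance

-- ===== CLAIM (what is proved, stated in full; the proofs are below) =====
def Claim_equal_compare_suffixes_py : Prop :=
  ∀ (s : String) (i : Int) (j : Int), Dom_compare_suffixes_py s i j →
    Pre_compare_suffixes_py s i j →
    Spec_compare_suffixes_py s i j (compare_suffixes_py s i j)

-- ===== LEMMAS AND PROOFS =====

-- the equal-length windows B compares, in Nat form
def pvCmpN (cs : List Char) (i j : Nat) : Int :=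
  let k := min (cs.length - i) (cs.length - j)
  let a := (cs.drop i).take k
  let b := (cs.drop j).take k
  (if b < a then 1 else 0) - (if a < b then 1 else 0)

lemma pvGoA_eq_cmpN (cs : List Char) (i j : Nat) :
    pvGoA cs (i : Int) (j : Int) = pvCmpN cs i j := by
  by_cases hi : i < cs.length
  · by_cases hj : j < cs.length
    · -- both in range: one comparison step
      have hk : min (cs.length - i) (cs.length - j)
          = min (cs.length - (i + 1)) (cs.length - (j + 1)) + 1 := by omega
      rw [pvGoA]
      simp only [Nat.cast_lt, hi, hj, and_self, dite_true,
        PySem.List.pyGet?_natCast, List.getElem?_eq_getElem hi, List.getElem?_eq_getElem hj]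
      have hdi : cs.drop i = cs[i] :: cs.drop (i + 1) := List.drop_eq_getElem_cons hi
      have hdj : cs.drop j = cs[j] :: cs.drop (j + 1) := List.drop_eq_getElem_cons hj
      unfold pvCmpN
      simp only [hk, hdi, hdj, List.take_succ_cons, List.cons_lt_cons_iff]
      rcases lt_trichotomy cs[i] cs[j] with h | h | h
      · simp [h, not_lt_of_gt h, ne_of_gt h, h.ne]
      · have hrec := pvGoA_eq_cmpN cs (i + 1) (j + 1)
        push_cast at hrec
        simp only [h, lt_irrefl, false_or, true_and] at *
        rw [hrec]; unfold pvCmpN; simp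
      · simp [h, not_lt_of_gt h, ne_of_gt h]
    · -- j out of range: loop exits, window length 0
      rw [pvGoA]
      have : ¬ ((i : Int) < cs.length ∧ (j : Int) < cs.length) := by omega
      simp only [this, dite_false]
      unfold pvCmpN
      have hk : min (cs.length - i) (cs.length - j) = 0 := by omega
      simp [hk]
  · rw [pvGoA]
    have : ¬ ((i : Int) < cs.length ∧ (j : Int) < cs.length) := by omega
    simp only [this, dite_false]
    unfold pvCmpN
    have hk : min (cs.length - i) (cs.length - j) = 0 := by omega
    simp [hk]
termination_by cs.length - i
decreasing_by omega

lemma pvAlt_eq_cmpN (s : String) (i j : Nat) :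
    compare_suffixes_py_alt s (i : Int) (j : Int) = pvCmpN s.toList i j := by
  unfold compare_suffixes_py_alt pvCmpN
  set cs := s.toList
  have hk : max 0 (min ((cs.length : Int) - i) ((cs.length : Int) - j))
      = ((min (cs.length - i) (cs.length - j) : Nat) : Int) := by push_cast; omega
  simp only [hk]
  have hsl : ∀ (m : Nat) (k : Nat),
      PySem.List.slice cs (some (m : Int)) (some ((m : Int) + (k : Int))) = (cs.drop m).take k :=
    fun m k => PySem.List.slice_natCast_add cs m k
  rw [hsl i _, hsl j _]

lemma pvGoA_loop_skip (cs : List Char) (i j : Int)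
    (h : (cs.length : Int) ≤ i ∨ (cs.length : Int) ≤ j) : pvGoA cs i j = 0 := by
  rw [pvGoA]
  have : ¬ ((i : Int) < cs.length ∧ (j : Int) < cs.length) := by omega
  simp [this]

lemma pvSlice_trivial (cs : List Char) (a : Int) :
    PySem.List.slice cs (some a) (some a) = [] := by
  have h := PySem.List.length_slice cs a a
  simp at h
  exact h

lemma pvAlt_skip (s : String) (i j : Int)
    (h : (s.toList.length : Int) ≤ i ∨ (s.toList.length : Int) ≤ j) :
    compare_suffixes_py_alt s i j = 0 := by
  unfold compare_suffixes_py_alt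
  have hk : max 0 (min ((s.toList.length : Int) - i) ((s.toList.length : Int) - j)) = 0 := by
    omega
  simp only [hk, add_zero]
  simp [pvSlice_trivial]

lemma pvGoA_self (cs : List Char) (i : Int) (h : -(cs.length : Int) ≤ i) :
    pvGoA cs i i = 0 := by
  rw [pvGoA]
  by_cases h2 : i < (cs.length : Int) ∧ i < (cs.length : Int)
  · have hr : PySem.Raise.InRange cs.length i := ⟨by omega, by omega⟩
    obtain ⟨c, hc⟩ : ∃ c, PySem.List.pyGet? cs i = some c := by
      rcases hg : PySem.List.pyGet? cs i with _ | c
      · rw [PySem.List.pyGet?_eq_none_iff] at hg; exact absurd hr hg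
      · exact ⟨c, rfl⟩
    have := pvGoA_self cs (i + 1) (by omega)
    simp [h2, hc, this]
  · rw [dif_neg h2]
termination_by ((cs.length : Int) - i).toNat
decreasing_by omega

lemma pvAlt_self (s : String) (i : Int) : compare_suffixes_py_alt s i i = 0 := by
  unfold compare_suffixes_py_alt
  simp

-- ===== VERDICT (by name: the statement is the Claim_ definition above) =====
theorem compare_suffixes_py_spec : Claim_equal_compare_suffixes_py := by
  intro s i j _hdom hpre
  unfold Spec_compare_suffixes_py compare_suffixes_py
  have hlen : PySem.Str.len s = (s.toList.length : Int) := by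
    simp [PySem.Str.len]
  rcases hpre with ⟨hi, hj⟩ | h | h | ⟨rfl, hi⟩
  · obtain ⟨i', rfl⟩ : ∃ n : Nat, i = (n : Int) := ⟨i.toNat, (Int.toNat_of_nonneg hi).symm⟩
    obtain ⟨j', rfl⟩ : ∃ n : Nat, j = (n : Int) := ⟨j.toNat, (Int.toNat_of_nonneg hj).symm⟩
    rw [pvGoA_eq_cmpN, pvAlt_eq_cmpN]
  · rw [hlen] at h; rw [pvGoA_loop_skip s.toList i j (Or.inl h), pvAlt_skip s i j (Or.inl h)]
  · rw [hlen] at h; rw [pvGoA_loop_skip s.toList i j (Or.inr h), pvAlt_skip s i j (Or.inr h)]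
  · rw [hlen] at hi; rw [pvGoA_self s.toList i hi, pvAlt_self]
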